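-- pv_equiv track=rewrite | github.com/BiancaBya/University-Projects | First-Semester/Fundamentele Programarii/Lab 13/Bun/BKT_recursiv.py | backtracking_recursiv
-- ===== SOURCE A (Python) =====
-- def validate(lista):
--     """
--     functia valideaza o solutie posibila, verificand daca exista doua numere in lista care sa indeplineasca proprietatea
--     :param lista: lista care trebuie verificata
--     :return: True/False daca solutia este corecta sau nu
--     """
--     for i in range(1, len(lista)):
--         ok = False
--         for j in range(0, i + 1):
--             if abs(lista[i] - lista[j]) == 1:
--                 ok = True
--         if not ok:
--             return False
--     return True
--
-- def backtracking_recursiv(n, permutare : list, toate_permutarile : list):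
--
--     if n == len(permutare):
--         if validate(permutare):
--             toate_permutarile.append(permutare)
--         return
--
--     for index in range (1, n+1):
--         if index not in permutare:
--             backtracking_recursiv(n, permutare + [index], toate_permutarile)
--
--     return toate_permutarile
-- ===== SOURCE B (Python) =====
-- def backtracking_recursiv(n, permutare: list, toate_permutarile: list):
--     # Alternative strategy: prune invalid prefixes immediately instead of validating
--     # only complete permutations: a position is valid iff some EARLIER element differs
--     # by 1, so validity can be checked incrementally while extending the prefix.
--     # Check the given initial prefix once, left to right.
--     seen = []
--     ok = True
--     for x in permutare:
--         if seen and not any(abs(x - y) == 1 for y in seen):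
--             ok = False
--         seen.append(x)
--     if not ok:
--         return toate_permutarile
--
--     def extend(prefix):
--         if len(prefix) == n:
--             toate_permutarile.append(prefix)
--             return
--         for index in range(1, n + 1):
--             if index not in prefix and (not prefix or any(abs(index - y) == 1 for y in prefix)):
--                 extend(prefix + [index])
--
--     extend(permutare)
--     return toate_permutarile
-- ===== Notes on version B (the rewrite author's own statement) =====
-- stated objective: alternative
-- what changed: B checks the adjacent-value property incrementally and prunes invalid prefixes during the backtracking (plus one upfront scan of the given prefix), instead of A's generating every permutation and validating only complete ones with a quadratic scan.
-- outside the precondition, e.g. on backtracking_recursiv(0, [], []): A returns None, B returns [[]]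
import Mathlib
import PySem

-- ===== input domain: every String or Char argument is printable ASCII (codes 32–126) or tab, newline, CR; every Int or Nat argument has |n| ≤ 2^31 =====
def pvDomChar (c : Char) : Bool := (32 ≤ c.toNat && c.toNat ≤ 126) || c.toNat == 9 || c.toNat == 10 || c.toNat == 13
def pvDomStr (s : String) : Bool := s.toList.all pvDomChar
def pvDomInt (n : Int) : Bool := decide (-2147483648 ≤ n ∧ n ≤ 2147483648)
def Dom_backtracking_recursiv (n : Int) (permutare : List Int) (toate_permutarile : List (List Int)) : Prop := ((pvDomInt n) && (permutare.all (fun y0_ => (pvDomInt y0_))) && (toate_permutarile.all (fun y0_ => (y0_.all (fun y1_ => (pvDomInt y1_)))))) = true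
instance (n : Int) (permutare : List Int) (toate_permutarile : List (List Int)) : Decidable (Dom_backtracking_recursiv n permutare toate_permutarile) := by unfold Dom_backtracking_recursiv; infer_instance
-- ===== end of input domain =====

-- B prunes invalid prefixes incrementally during the backtracking instead of
-- validating complete permutations only (objective: alternative search strategy).
-- Both Pythons mutate toate_permutarile in place identically; the equivalence
-- proved here is about the return value.

-- ===== PORT A =====
-- validate: outer loop with early 'return False' = .all; inner ok-flag loop kept as a fold.
def validateA (lista : List Int) : Bool :=
  (PySem.List.pyRange 1 lista.length 1).all (fun i =>
    (PySem.List.pyRange 0 (i + 1) 1).foldl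
      (fun ok j => if (PySem.List.pyGetD lista i 0 - PySem.List.pyGetD lista j 0).natAbs == 1 then true else ok)
      false)

-- The Python recursion communicates through mutation of toate_permutarile; the pure
-- port threads that list as the accumulator.  fuel = n.toNat + 1 bounds the recursion
-- depth (each call adds one element of 1..n missing from permutare), a totality guard only.
def btA (fuel : Nat) (n : Int) (permutare : List Int) (toate : List (List Int)) : List (List Int) :=
  match fuel with
  | 0 => toate
  | fuel + 1 =>
    if n = (permutare.length : Int) then
      (if validateA permutare then toate ++ [permutare] else toate)
    else
      (PySem.List.pyRange 1 (n + 1) 1).foldl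
        (fun acc index =>
          if !(permutare.contains index) then btA fuel n (permutare ++ [index]) acc else acc)
        toate

def backtracking_recursiv (n : Int) (permutare : List Int) (toate_permutarile : List (List Int)) : List (List Int) :=
  btA (n.toNat + 1) n permutare toate_permutarile

-- ===== PORT B =====
def goodExt (x : Int) (seen : List Int) : Bool := seen.any (fun y => (x - y).natAbs == 1)

-- the 'seen/ok' loop of Source B, as a fold over the prefix
def prefixValidB (permutare : List Int) : Bool :=
  (permutare.foldl
    (fun st x => (st.1 && (st.2.isEmpty || goodExt x st.2), st.2 ++ [x]))
    ((true : Bool), ([] : List Int))).1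

-- the pruned extend; same fuel totality guard as btA
def btB (fuel : Nat) (n : Int) (pref : List Int) (toate : List (List Int)) : List (List Int) :=
  match fuel with
  | 0 => toate
  | fuel + 1 =>
    if n = (pref.length : Int) then toate ++ [pref]
    else
      (PySem.List.pyRange 1 (n + 1) 1).foldl
        (fun acc index =>
          if !(pref.contains index) && (pref.isEmpty || goodExt index pref) then
            btB fuel n (pref ++ [index]) acc
          else acc)
        toate

def backtracking_recursiv_alt (n : Int) (permutare : List Int) (toate_permutarile : List (List Int)) : List (List Int) :=
  if prefixValidB permutare then btB (n.toNat + 1) n permutare toate_permutarile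
  else toate_permutarile

-- ===== PRECONDITION & SPEC =====
-- Pre_ excludes exactly n = len(permutare), where Python A executes a bare 'return'
-- and yields None instead of a list of lists.
def Pre_backtracking_recursiv (n : Int) (permutare : List Int) (toate_permutarile : List (List Int)) : Prop :=
  n ≠ (permutare.length : Int)
instance (n : Int) (permutare : List Int) (toate_permutarile : List (List Int)) : Decidable (Pre_backtracking_recursiv n permutare toate_permutarile) := by unfold Pre_backtracking_recursiv; infer_instance

def pvWitness_backtracking_recursiv : Int × List Int × List (List Int) := (3, [], [])

def Spec_backtracking_recursiv (n : Int) (permutare : List Int) (toate_permutarile : List (List Int)) (out : List (List Int)) : Prop := out = backtracking_recursiv_alt n permutare toate_permutarile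
instance (n : Int) (permutare : List Int) (toate_permutarile : List (List Int)) (out : List (List Int)) : Decidable (Spec_backtracking_recursiv n permutare toate_permutarile out) := by unfold Spec_backtracking_recursiv; infer_instance

-- ===== CLAIM (what is proved, stated in full; the proofs are below) =====
def Claim_equal_backtracking_recursiv : Prop := ∀ (n : Int) (permutare : List Int) (toate_permutarile : List (List Int)), Dom_backtracking_recursiv n permutare toate_permutarile → Pre_backtracking_recursiv n permutare toate_permutarile → Spec_backtracking_recursiv n permutare toate_permutarile (backtracking_recursiv n permutare toate_permutarile)

-- ===== LEMMAS AND PROOFS =====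

theorem all_congr_mem {α : Type} {l : List α} {p q : α → Bool}
    (h : ∀ a ∈ l, p a = q a) : l.all p = l.all q := by
  induction l with
  | nil => rfl
  | cons x t ih =>
    simp only [List.all_cons, h x (by simp), ih (fun a ha => h a (by simp [ha]))]

theorem any_congr_mem {α : Type} {l : List α} {p q : α → Bool}
    (h : ∀ a ∈ l, p a = q a) : l.any p = l.any q := by
  induction l with
  | nil => rfl
  | cons x t ih =>
    simp only [List.any_cons, h x (by simp), ih (fun a ha => h a (by simp [ha]))]

-- the ok-flag fold is an 'any'
theorem foldl_ok_flag (p : Int → Bool) (b : Bool) (l : List Int) :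
    l.foldl (fun ok j => if p j then true else ok) b = (b || l.any p) := by
  induction l generalizing b with
  | nil => simp
  | cons x t ih =>
    simp only [List.foldl_cons, List.any_cons, ih]
    by_cases h : p x = true <;> simp [h]

theorem pyGetD_append_left (l : List Int) (x : Int) (i : Int)
    (h0 : 0 ≤ i) (h1 : i < (l.length : Int)) :
    PySem.List.pyGetD (l ++ [x]) i 0 = PySem.List.pyGetD l i 0 := by
  rw [PySem.List.pyGetD_eq_getElem (l ++ [x]) 0 h0 (by simp; omega),
      PySem.List.pyGetD_eq_getElem l 0 h0 h1]
  exact List.getElem_append_left (by omega)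

theorem pyGetD_append_last (l : List Int) (x : Int) :
    PySem.List.pyGetD (l ++ [x]) (l.length : Int) 0 = x := by
  rw [PySem.List.pyGetD_eq_getElem (l ++ [x]) 0 (by positivity) (by simp)]
  simp

-- the snoc characterisation of validate
theorem validateA_snoc (l : List Int) (x : Int) :
    validateA (l ++ [x]) = (validateA l && (l.isEmpty || goodExt x l)) := by
  rcases l with _ | ⟨a, t⟩
  · simp [validateA, PySem.List.pyRange_one_eq_nil]
  · set l := a :: t with hl
    have hlen : (1 : Int) ≤ (l.length : Int) := by simp [hl]
    unfold validateA
    have hlen' : ((l ++ [x]).length : Int) = (l.length : Int) + 1 := by simp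
    rw [hlen', PySem.List.pyRange_one_succ_right hlen, List.all_append]
    simp only [List.all_cons, List.all_nil, Bool.and_true]
    have hmain :
        (PySem.List.pyRange 1 (l.length : Int) 1).all (fun i =>
          (PySem.List.pyRange 0 (i + 1) 1).foldl
            (fun ok j => if (PySem.List.pyGetD (l ++ [x]) i 0 - PySem.List.pyGetD (l ++ [x]) j 0).natAbs == 1 then true else ok)
            false)
        = (PySem.List.pyRange 1 (l.length : Int) 1).all (fun i =>
          (PySem.List.pyRange 0 (i + 1) 1).foldl
            (fun ok j => if (PySem.List.pyGetD l i 0 - PySem.List.pyGetD l j 0).natAbs == 1 then true else ok)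
            false) := by
      apply all_congr_mem
      intro i hi
      rw [PySem.List.mem_pyRange_one] at hi
      rw [foldl_ok_flag, foldl_ok_flag]
      congr 1
      apply any_congr_mem
      intro j hj
      rw [PySem.List.mem_pyRange_one] at hj
      rw [pyGetD_append_left l x i (by omega) hi.2,
          pyGetD_append_left l x j (by omega) (by omega)]
    have h3 : (PySem.List.pyRange 0 (l.length : Int) 1).map (fun j => PySem.List.pyGetD l j 0) = l := by
      have h := PySem.List.map_pyGetD_pyRange_zero l 0
      simpa [PySem.List.len] using h
    have hlast :
        ((PySem.List.pyRange 0 ((l.length : Int) + 1) 1).foldl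
          (fun ok j => if (PySem.List.pyGetD (l ++ [x]) (l.length : Int) 0 - PySem.List.pyGetD (l ++ [x]) j 0).natAbs == 1 then true else ok)
          false) = goodExt x l := by
      rw [foldl_ok_flag, PySem.List.pyRange_one_succ_right (by positivity), List.any_append]
      simp only [pyGetD_append_last, List.any_cons, List.any_nil]
      have h2 : ∀ j ∈ PySem.List.pyRange 0 (l.length : Int) 1,
          ((x - PySem.List.pyGetD (l ++ [x]) j 0).natAbs == 1) =
          ((fun y => (x - y).natAbs == 1) (PySem.List.pyGetD l j 0)) := by
        intro j hj
        rw [PySem.List.mem_pyRange_one] at hj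
        rw [pyGetD_append_left l x j hj.1 hj.2]
      have h4 : (PySem.List.pyRange 0 (l.length : Int) 1).any
          (fun j => (fun y => (x - y).natAbs == 1) (PySem.List.pyGetD l j 0)) = goodExt x l := by
        conv_rhs => rw [goodExt, ← h3, List.any_map]
        rfl
      rw [any_congr_mem h2, h4]
      simp
    rw [hmain, hlast]
    simp [hl]

theorem validateA_nil : validateA [] = true := by
  simp [validateA, PySem.List.pyRange_one_eq_nil]

-- the recursive reading of Source B's prefix loop
def validRel (seen : List Int) : List Int → Bool
  | [] => true
  | x :: t => ((seen.isEmpty || goodExt x seen) && validRel (seen ++ [x]) t)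

theorem prefixFold_eq (l : List Int) (b : Bool) (seen : List Int) :
    l.foldl (fun st x => (st.1 && (st.2.isEmpty || goodExt x st.2), st.2 ++ [x])) (b, seen)
      = (b && validRel seen l, seen ++ l) := by
  induction l generalizing b seen with
  | nil => simp [validRel]
  | cons x t ih => simp [validRel, ih, Bool.and_assoc]

theorem validateA_append (seen l : List Int) :
    validateA (seen ++ l) = (validateA seen && validRel seen l) := by
  induction l generalizing seen with
  | nil => simp [validRel]
  | cons x t ih =>
    have h : seen ++ x :: t = (seen ++ [x]) ++ t := by simp
    rw [h, ih, validateA_snoc, validRel, Bool.and_assoc]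

theorem prefixValidB_eq (l : List Int) : prefixValidB l = validateA l := by
  unfold prefixValidB
  rw [prefixFold_eq]
  have h := validateA_append [] l
  simp only [List.nil_append, validateA_nil, Bool.true_and] at h
  simp [h]

-- the main correspondence: A's exhaustive search equals B's pruned search,
-- gated by validity of the current prefix
theorem btA_eq_btB (fuel : Nat) (n : Int) (pref : List Int) (toate : List (List Int)) :
    btA fuel n pref toate = (if validateA pref then btB fuel n pref toate else toate) := by
  induction fuel generalizing pref toate with
  | zero => simp [btA, btB]
  | succ fuel ih =>
    rw [btA, btB]
    by_cases hn : n = (pref.length : Int)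
    · simp only [if_pos hn]
    · simp only [if_neg hn]
      by_cases hv : validateA pref = true
      · rw [if_pos hv]
        apply List.foldl_ext
        intro acc index _
        rw [ih, validateA_snoc, hv, Bool.true_and]
        by_cases hc : index ∈ pref <;>
          by_cases hg : (pref.isEmpty || goodExt index pref) = true <;>
            simp [hc, hg]
      · rw [if_neg hv]
        simp only [Bool.not_eq_true] at hv
        have hstep : ∀ (acc : List (List Int)), ∀ index ∈ PySem.List.pyRange 1 (n + 1) 1,
            (if !(pref.contains index) then btA fuel n (pref ++ [index]) acc else acc) = acc := by
          intro acc index _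
          rw [ih, validateA_snoc, hv]
          simp
        calc (PySem.List.pyRange 1 (n + 1) 1).foldl
              (fun acc index => if !(pref.contains index) then btA fuel n (pref ++ [index]) acc else acc) toate
            = (PySem.List.pyRange 1 (n + 1) 1).foldl (fun acc _ => acc) toate :=
              List.foldl_ext _ _ _ (fun acc index h => hstep acc index h)
          _ = toate := List.foldl_fixed _

-- ===== VERDICT (by name: the statement is the Claim_ definition above) =====
theorem backtracking_recursiv_spec : Claim_equal_backtracking_recursiv := by
  intro n permutare toate _ _
  unfold Spec_backtracking_recursiv backtracking_recursiv backtracking_recursiv_alt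
  rw [btA_eq_btB, prefixValidB_eq]
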